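-- pv_equiv track=rewrite | github.com/RanchoYuan/FindFibonacciPalindrome | FindFibonacciPalindrome.py | FindFibonacciPalindrome
-- ===== SOURCE A (Python) =====
-- def FindFibonacciPalindrome(sequence):
--     if sequence == None or len(sequence) < 1:
--         return ()
--     start_index = 0
--     max_sub_seq_len = 0
--     for i in range(len(sequence)):
--         len1 = centerExpand(sequence, i, i)
--         if len1 > max_sub_seq_len:
--             sub_seq = sequence[i - (len1 - 1) // 2: i + (len1 - 1) // 2 + 1]
--             if isFibonacci(sub_seq):
--                 start_index = i - (len1 - 1) // 2
--                 max_sub_seq_len = len1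
--         len2 = centerExpand(sequence, i, i + 1)
--         if len2 > max_sub_seq_len:
--             sub_seq = sequence[i - len2 // 2 + 1: i + len2 // 2 + 1]
--             if isFibonacci(sub_seq):
--                 start_index = i - len2 // 2 + 1
--                 max_sub_seq_len = len2
--     return start_index, max_sub_seq_len
--
-- def centerExpand(s, left, right):
--     while left >= 0 and right < len(s) and s[left] == s[right]:
--         left -= 1
--         right += 1
--     return right - left - 1
--
-- def isFibonacci(sequence):
--     if len(sequence) < 3:
--         return True
--     for i in range(0, len(sequence) - 2):
--         if not (sequence[i] == sequence[i + 2] or sequence[i] == sequence[i + 1] + sequence[i + 2] or sequence[i + 2] == sequence[i] + sequence[i + 1]):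
--             return False
--     return True
-- ===== SOURCE B (Python) =====
-- def FindFibonacciPalindrome(sequence):
--     # Precompute a 0/1 list of invalid Fibonacci triples and its prefix sums, so each
--     # candidate palindrome is Fibonacci-checked in O(1) instead of re-scanning a slice.
--     if sequence is None or len(sequence) < 1:
--         return ()
--     n = len(sequence)
--     bad = [0 if (x == z or x == y + z or z == x + y) else 1
--            for x, y, z in zip(sequence, sequence[1:], sequence[2:])]
--     pref = [0]
--     t = 0
--     for v in bad:
--         t += v
--         pref.append(t)
--     cands = []
--     for c in range(2 * n):
--         a, b = expandBounds(sequence, c // 2, (c + 1) // 2)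
--         if b - a > 0 and (b - a < 3 or pref[b - 2] == pref[a]):
--             cands.append((a, b - a))
--     best = (0, 0)
--     for cand in cands:
--         if cand[1] > best[1]:
--             best = cand
--     return best
--
-- def expandBounds(s, left, right):
--     while left >= 0 and right < len(s) and s[left] == s[right]:
--         left -= 1
--         right += 1
--     return left + 1, right
-- ===== Notes on version B (the rewrite author's own statement) =====
-- stated objective: alternative
-- what changed: B precomputes a 0/1 invalid-triple list with running prefix sums so each candidate palindrome's Fibonacci property is a single prefix-sum comparison instead of A's per-candidate slice rescan, uses a bounds-returning expansion (no slice/index arithmetic), and separates candidate generation over 2n centers from a final selection pass.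
import Mathlib
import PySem

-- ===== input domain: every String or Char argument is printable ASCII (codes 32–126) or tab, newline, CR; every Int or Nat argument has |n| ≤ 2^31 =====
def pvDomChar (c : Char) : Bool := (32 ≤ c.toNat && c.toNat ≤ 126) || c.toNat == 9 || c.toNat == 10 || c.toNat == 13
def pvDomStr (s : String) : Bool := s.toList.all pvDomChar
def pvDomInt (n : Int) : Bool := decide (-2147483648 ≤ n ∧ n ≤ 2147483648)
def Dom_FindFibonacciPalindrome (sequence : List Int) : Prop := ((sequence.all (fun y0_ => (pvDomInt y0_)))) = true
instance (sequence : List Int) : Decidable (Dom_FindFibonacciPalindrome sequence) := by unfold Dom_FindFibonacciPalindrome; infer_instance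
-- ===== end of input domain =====

-- B replaces A's per-candidate slice scan by a precomputed invalid-triple prefix-sum
-- (O(1) Fibonacci check per candidate) and separates candidate generation from selection
-- (objective: alternative).

-- ===== PORT A =====
-- while-loop of centerExpand; fuel s.length+1 exceeds the possible iteration count
def centerExpandAux (s : List Int) : Nat → Int → Int → Int
  | 0, left, right => right - left - 1
  | f + 1, left, right =>
    if 0 ≤ left ∧ right < (s.length : Int) ∧
        PySem.List.pyGetD s left 0 = PySem.List.pyGetD s right 0 then
      centerExpandAux s f (left - 1) (right + 1)
    else right - left - 1

def centerExpand (s : List Int) (left right : Int) : Int :=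
  centerExpandAux s (s.length + 1) left right

def isFibonacci (s : List Int) : Bool :=
  if s.length < 3 then true
  else
    (PySem.List.pyRange 0 ((s.length : Int) - 2) 1).all fun i =>
      let x := PySem.List.pyGetD s i 0
      let y := PySem.List.pyGetD s (i + 1) 0
      let z := PySem.List.pyGetD s (i + 2) 0
      x == z || x == y + z || z == x + y

def fibStep (s : List Int) (st : Int × Int) (i : Int) : Int × Int :=
  let len1 := centerExpand s i i
  let st1 :=
    if len1 > st.2 then
      let start := i - PySem.Int.floordiv (len1 - 1) 2
      if isFibonacci (PySem.List.slice s (some start)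
          (some (i + PySem.Int.floordiv (len1 - 1) 2 + 1))) then (start, len1) else st
    else st
  let len2 := centerExpand s i (i + 1)
  if len2 > st1.2 then
    let start2 := i - PySem.Int.floordiv len2 2 + 1
    if isFibonacci (PySem.List.slice s (some start2)
        (some (i + PySem.Int.floordiv len2 2 + 1))) then (start2, len2) else st1
  else st1

def FindFibonacciPalindrome (sequence : List Int) : List Int :=
  if sequence.length < 1 then []
  else
    let res := (PySem.List.pyRange 0 (sequence.length : Int) 1).foldl (fibStep sequence) (0, 0)
    [res.1, res.2]

-- ===== PORT B =====
-- same while-loop as Source B's expandBounds, returning the (start, stop) bounds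
def expandBoundsAux (s : List Int) : Nat → Int → Int → Int × Int
  | 0, l, r => (l + 1, r)
  | f + 1, l, r =>
    if 0 ≤ l ∧ r < (s.length : Int) ∧
        PySem.List.pyGetD s l 0 = PySem.List.pyGetD s r 0 then
      expandBoundsAux s f (l - 1) (r + 1)
    else (l + 1, r)

def expandBounds (s : List Int) (l r : Int) : Int × Int :=
  expandBoundsAux s (s.length + 1) l r

-- bad = [0 if triple ok else 1 for x,y,z in zip(seq, seq[1:], seq[2:])]
def badList (s : List Int) : List Int :=
  List.zipWith (fun p z => if p.1 == z || p.1 == p.2 + z || z == p.1 + p.2 then (0 : Int) else 1)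
    (List.zipWith Prod.mk s (PySem.List.slice s (some 1) none))
    (PySem.List.slice s (some 2) none)

def prefSums (bad : List Int) : List Int :=
  (bad.foldl (fun pt v => (pt.1 ++ [pt.2 + v], pt.2 + v)) (([0] : List Int), (0 : Int))).1

def fibOk (pref : List Int) (a b : Int) : Bool :=
  decide (b - a < 3) || (PySem.List.pyGetD pref (b - 2) 0 == PySem.List.pyGetD pref a 0)

def candStep (s : List Int) (pref : List Int) (cs : List (Int × Int)) (c : Int) : List (Int × Int) :=
  let ab := expandBounds s (PySem.Int.floordiv c 2) (PySem.Int.floordiv (c + 1) 2)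
  if decide (ab.2 - ab.1 > 0) && fibOk pref ab.1 ab.2 then cs ++ [(ab.1, ab.2 - ab.1)] else cs

def FindFibonacciPalindrome_alt (sequence : List Int) : List Int :=
  if sequence.length < 1 then []
  else
    let pref := prefSums (badList sequence)
    let cands := (PySem.List.pyRange 0 (2 * (sequence.length : Int)) 1).foldl
      (candStep sequence pref) []
    let best := cands.foldl (fun b cand => if cand.2 > b.2 then cand else b) ((0, 0) : Int × Int)
    [best.1, best.2]

-- ===== PRECONDITION & SPEC =====
def Spec_FindFibonacciPalindrome (sequence : List Int) (out : List Int) : Prop := out = FindFibonacciPalindrome_alt sequence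
instance (sequence : List Int) (out : List Int) : Decidable (Spec_FindFibonacciPalindrome sequence out) := by unfold Spec_FindFibonacciPalindrome; infer_instance

-- ===== CLAIM (what is proved, stated in full; the proofs are below) =====
def Claim_equal_FindFibonacciPalindrome : Prop := ∀ (sequence : List Int), Dom_FindFibonacciPalindrome sequence → Spec_FindFibonacciPalindrome sequence (FindFibonacciPalindrome sequence)

-- ===== LEMMAS AND PROOFS =====

-- the two expansion loops are the same loop, viewed as a length resp. as bounds
theorem aux_len (s : List Int) : ∀ (f : Nat) (l r : Int),
    centerExpandAux s f l r = (expandBoundsAux s f l r).2 - (expandBoundsAux s f l r).1 := by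
  intro f
  induction f with
  | zero => intro l r; simp [centerExpandAux, expandBoundsAux]; ring
  | succ f ih =>
    intro l r
    simp only [centerExpandAux, expandBoundsAux]
    split_ifs with h
    · exact ih _ _
    · ring

theorem aux_sum (s : List Int) : ∀ (f : Nat) (l r : Int),
    (expandBoundsAux s f l r).1 + (expandBoundsAux s f l r).2 = l + r + 1 := by
  intro f
  induction f with
  | zero => intro l r; simp [expandBoundsAux]; ring
  | succ f ih =>
    intro l r
    simp only [expandBoundsAux]
    split_ifs with h
    · rw [ih]; ring
    · ring

theorem aux_fst_nonneg (s : List Int) : ∀ (f : Nat) (l r : Int), -1 ≤ l →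
    0 ≤ (expandBoundsAux s f l r).1 := by
  intro f
  induction f with
  | zero => intro l r h; simp [expandBoundsAux]; omega
  | succ f ih =>
    intro l r h
    simp only [expandBoundsAux]
    split_ifs with hg
    · exact ih _ _ (by omega)
    · simp; omega

theorem aux_snd_le (s : List Int) : ∀ (f : Nat) (l r : Int), r ≤ (s.length : Int) →
    (expandBoundsAux s f l r).2 ≤ (s.length : Int) := by
  intro f
  induction f with
  | zero => intro l r h; simpa [expandBoundsAux] using h
  | succ f ih =>
    intro l r h
    simp only [expandBoundsAux]
    split_ifs with hg
    · exact ih _ _ (by omega)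
    · simpa using h

theorem aux_snd_ge (s : List Int) : ∀ (f : Nat) (l r : Int), r ≤ (expandBoundsAux s f l r).2 := by
  intro f
  induction f with
  | zero => intro l r; simp [expandBoundsAux]
  | succ f ih =>
    intro l r
    simp only [expandBoundsAux]
    split_ifs with hg
    · have := ih (l - 1) (r + 1); omega
    · simp

theorem centerExpand_eq (s : List Int) (l r : Int) :
    centerExpand s l r = (expandBounds s l r).2 - (expandBounds s l r).1 := by
  unfold centerExpand expandBounds; exact aux_len s _ l r

theorem eb_sum (s : List Int) (l r : Int) :
    (expandBounds s l r).1 + (expandBounds s l r).2 = l + r + 1 := by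
  unfold expandBounds; exact aux_sum s _ l r

theorem eb_fst (s : List Int) (l r : Int) (h : -1 ≤ l) : 0 ≤ (expandBounds s l r).1 := by
  unfold expandBounds; exact aux_fst_nonneg s _ l r h

theorem eb_snd_le (s : List Int) (l r : Int) (h : r ≤ (s.length : Int)) :
    (expandBounds s l r).2 ≤ (s.length : Int) := by
  unfold expandBounds; exact aux_snd_le s _ l r h

theorem eb_snd_ge (s : List Int) (l r : Int) : r ≤ (expandBounds s l r).2 := by
  unfold expandBounds; exact aux_snd_ge s _ l r

theorem fd2 (k : Int) : PySem.Int.floordiv (2 * k) 2 = k := by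
  rw [PySem.Int.floordiv_eq_iff_of_pos (by norm_num)]; omega

theorem fd2' (k : Int) : PySem.Int.floordiv (2 * k + 1) 2 = k := by
  rw [PySem.Int.floordiv_eq_iff_of_pos (by norm_num)]; omega

theorem slice1 (s : List Int) : PySem.List.slice s (some 1) none = s.tail :=
  PySem.List.slice_from_one s

theorem slice2 (s : List Int) : PySem.List.slice s (some 2) none = s.drop 2 := by
  have := PySem.List.slice_from s (a := 2) (by norm_num)
  simpa using this

theorem badList_length (s : List Int) : (badList s).length = s.length - 2 := by
  simp only [badList, slice1, slice2, List.length_zipWith, List.length_tail, List.length_drop]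
  omega

theorem badList_getElem (s : List Int) (j : Nat) (h : j + 2 < s.length) :
    (badList s)[j]'(by rw [badList_length]; omega) =
      if s[j]'(by omega) == s[j+2]'h || s[j]'(by omega) == s[j+1]'(by omega) + s[j+2]'h
          || s[j+2]'h == s[j]'(by omega) + s[j+1]'(by omega) then (0:Int) else 1 := by
  simp only [badList, slice1, slice2]
  rw [List.getElem_zipWith, List.getElem_zipWith]
  simp only [List.getElem_tail, List.getElem_drop, show 2 + j = j + 2 from by omega]

theorem badList_slice (s : List Int) (a b : Nat) (hb : b ≤ s.length) :
    badList ((s.drop a).take (b - a)) = ((badList s).drop a).take (b - a - 2) := by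
  apply List.ext_getElem
  · simp only [badList_length, List.length_take, List.length_drop, badList_length]
    omega
  · intro j h1 h2
    have hb1 : j < min (b - a) (s.length - a) - 2 := by
      rw [badList_length, List.length_take, List.length_drop] at h1; exact h1
    have hin : j + 2 < ((s.drop a).take (b - a)).length := by
      simp only [List.length_take, List.length_drop]; omega
    have hjs : a + j + 2 < s.length := by omega
    rw [List.getElem_take, List.getElem_drop]
    rw [badList_getElem _ _ hin, badList_getElem _ _ hjs]
    simp only [List.getElem_take, List.getElem_drop,
      show a + (j + 1) = a + j + 1 from by omega, show a + (j + 2) = a + j + 2 from by omega]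

theorem pyGetD_cast (t : List Int) (j : Nat) (h : j < t.length) :
    PySem.List.pyGetD t (↑j) 0 = t[j]'h := by
  rw [PySem.List.pyGetD_natCast]; exact List.getD_eq_getElem _ _ h

theorem predEq (t : List Int) (j : Nat) (h : j + 2 < t.length) :
    (PySem.List.pyGetD t (↑j) 0 == PySem.List.pyGetD t (↑j + 2) 0 ||
       PySem.List.pyGetD t (↑j) 0 == PySem.List.pyGetD t (↑j + 1) 0 + PySem.List.pyGetD t (↑j + 2) 0 ||
       PySem.List.pyGetD t (↑j + 2) 0 == PySem.List.pyGetD t (↑j) 0 + PySem.List.pyGetD t (↑j + 1) 0)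
      = ((badList t)[j]'(by rw [badList_length]; omega) == 0) := by
  rw [badList_getElem _ _ h]
  have e1 : ((j:Nat) : Int) + 1 = ((j + 1 : Nat) : Int) := by push_cast; ring
  have e2 : ((j:Nat) : Int) + 2 = ((j + 2 : Nat) : Int) := by push_cast; ring
  simp only [e1, e2, pyGetD_cast t j (by omega), pyGetD_cast t (j+1) (by omega),
    pyGetD_cast t (j+2) h]
  split_ifs with hg
  · simp [hg]
  · simp only [Bool.or_eq_true, beq_iff_eq] at hg
    simp
    omega

theorem isFib_eq (t : List Int) :
    isFibonacci t = (badList t).all (fun v => v == 0) := by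
  by_cases h3 : t.length < 3
  · have hnil : badList t = [] := by
      rw [← List.length_eq_zero_iff, badList_length]; omega
    simp [isFibonacci, h3, hnil]
  · rw [Bool.eq_iff_iff]
    simp only [isFibonacci, if_neg h3, List.all_eq_true]
    constructor
    · intro H v hv
      obtain ⟨j, hjlen, rfl⟩ := List.mem_iff_getElem.mp hv
      have hj2 : j + 2 < t.length := by rw [badList_length] at hjlen; omega
      rw [← predEq t j hj2]
      exact H _ (by rw [PySem.List.mem_pyRange_one]; constructor <;> [omega; (push_cast; omega)])
    · intro H i hi
      rw [PySem.List.mem_pyRange_one] at hi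
      obtain ⟨h0, hlt⟩ := hi
      have hij : ((i.toNat : Nat) : Int) = i := Int.toNat_of_nonneg h0
      have hj2 : i.toNat + 2 < t.length := by omega
      rw [← hij, predEq t i.toNat hj2]
      exact H _ (List.getElem_mem _)

theorem prefSums_fold (bad : List Int) : ∀ (p : List Int) (t : Int),
    (bad.foldl (fun pt v => (pt.1 ++ [pt.2 + v], pt.2 + v)) (p, t)).1
      = p ++ (List.range bad.length).map (fun k => t + (bad.take (k + 1)).sum) := by
  induction bad with
  | nil => intro p t; simp
  | cons v rest ih =>
    intro p t
    simp only [List.foldl_cons]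
    rw [ih]
    rw [List.length_cons, List.range_succ_eq_map, List.map_cons, List.map_map, List.append_assoc]
    congr 1
    rw [List.singleton_append]
    congr 1
    · simp
    · apply List.map_congr_left
      intro k _
      simp only [Function.comp, List.take_succ_cons, List.sum_cons]
      ring

theorem prefSums_eq (bad : List Int) :
    prefSums bad = (List.range (bad.length + 1)).map (fun k => (bad.take k).sum) := by
  rw [prefSums, prefSums_fold]
  rw [List.range_succ_eq_map, List.map_cons, List.map_map]
  simp

theorem badList_mem01 (s : List Int) (v : Int) (hv : v ∈ badList s) : v = 0 ∨ v = 1 := by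
  obtain ⟨j, hj, rfl⟩ := List.mem_iff_getElem.mp hv
  have hj2 : j + 2 < s.length := by rw [badList_length] at hj; omega
  rw [badList_getElem _ _ hj2]
  split_ifs <;> simp

theorem sum01_zero_iff (l : List Int) (h : ∀ v ∈ l, v = 0 ∨ v = 1) :
    l.sum = 0 ↔ ∀ v ∈ l, v = 0 := by
  induction l with
  | nil => simp
  | cons x t ih =>
    have hx := h x (by simp)
    have ht : ∀ v ∈ t, v = 0 ∨ v = 1 := fun v hv => h v (by simp [hv])
    have hs : 0 ≤ t.sum := List.sum_nonneg (fun v hv => by rcases ht v hv with h' | h' <;> omega)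
    simp only [List.sum_cons, List.mem_cons]
    constructor
    · intro he
      have hx0 : x = 0 := by omega
      have := (ih ht).mp (by omega)
      intro v hv
      rcases hv with rfl | hv
      · exact hx0
      · exact this v hv
    · intro hv
      have := (ih ht).mpr (fun v h' => hv v (Or.inr h'))
      have := hv x (Or.inl rfl)
      omega

theorem pref_getElem (bad : List Int) (k : Nat) (hk : k ≤ bad.length) :
    PySem.List.pyGetD (prefSums bad) (↑k) 0 = (bad.take k).sum := by
  rw [PySem.List.pyGetD_natCast, prefSums_eq]
  rw [List.getD_eq_getElem _ _ (by simp; omega)]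
  rw [List.getElem_map, List.getElem_range]

theorem fib_eq_fibOk (s : List Int) (a b : Int) (h0 : 0 ≤ a) (hb0 : 0 ≤ b)
    (hb : b ≤ (s.length : Int)) :
    isFibonacci (PySem.List.slice s (some a) (some b)) = fibOk (prefSums (badList s)) a b := by
  rw [PySem.List.slice_toNat s h0 hb0]
  by_cases hlt : b - a < 3
  · have hfo : fibOk (prefSums (badList s)) a b = true := by
      simp [fibOk, hlt]
    rw [hfo, isFibonacci, if_pos]
    simp only [List.length_take, List.length_drop]
    omega
  · set A := a.toNat with hA
    set B := b.toNat with hB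
    have hAB : A + 3 ≤ B := by omega
    have hBn : B ≤ s.length := by omega
    rw [isFib_eq, badList_slice s A B hBn]
    have hfo : fibOk (prefSums (badList s)) a b
        = (((badList s).take (B - 2)).sum == ((badList s).take A).sum) := by
      have e1 : b - 2 = ((B - 2 : Nat) : Int) := by omega
      have e2 : a = ((A : Nat) : Int) := by omega
      rw [fibOk]
      have hd : decide (b - a < 3) = false := by simp [hlt]
      rw [hd, Bool.false_or, e1, e2]
      rw [pref_getElem _ _ (by rw [badList_length]; omega),
          pref_getElem _ _ (by rw [badList_length]; omega)]
    rw [hfo]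
    have hsplit : (badList s).take (B - 2)
        = (badList s).take A ++ ((badList s).drop A).take (B - 2 - A) := by
      rw [← List.take_add]
      congr 1
      omega
    rw [Bool.eq_iff_iff, List.all_eq_true]
    set seg := ((badList s).drop A).take (B - A - 2) with hseg
    have hseg' : ((badList s).drop A).take (B - 2 - A) = seg := by
      rw [hseg]
      congr 1
      omega
    have hmem : ∀ v ∈ seg, v = 0 ∨ v = 1 := fun v hv =>
      badList_mem01 s v (List.mem_of_mem_drop (List.mem_of_mem_take hv))
    constructor
    · intro H
      have : seg.sum = 0 := (sum01_zero_iff seg hmem).mpr (fun v hv => by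
        have := H v hv; simpa using this)
      rw [hsplit, hseg', List.sum_append]
      simp [this]
    · intro H v hv
      rw [hsplit, hseg', List.sum_append] at H
      have hz : seg.sum = 0 := by
        have := beq_iff_eq.mp H
        omega
      have := (sum01_zero_iff seg hmem).mp hz v hv
      simpa using this

-- the fused generation+selection step of B
def fusedStep (s : List Int) (pref : List Int) (st : Int × Int) (c : Int) : Int × Int :=
  let ab := expandBounds s (PySem.Int.floordiv c 2) (PySem.Int.floordiv (c + 1) 2)
  if decide (ab.2 - ab.1 > 0) && fibOk pref ab.1 ab.2 then
    (if ab.2 - ab.1 > st.2 then (ab.1, ab.2 - ab.1) else st)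
  else st

theorem sel_gen (s pref : List Int) : ∀ (l : List Int) (cs0 : List (Int × Int)) (st : Int × Int),
    (l.foldl (candStep s pref) cs0).foldl (fun b cand => if cand.2 > b.2 then cand else b) st
      = l.foldl (fusedStep s pref) (cs0.foldl (fun b cand => if cand.2 > b.2 then cand else b) st) := by
  intro l
  induction l with
  | nil => intro cs0 st; simp
  | cons c t ih =>
    intro cs0 st
    simp only [List.foldl_cons]
    rw [ih]
    congr 1
    simp only [candStep, fusedStep]
    split_ifs with h hgt
    · rw [List.foldl_append]
      simp only [List.foldl_cons, List.foldl_nil]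
      exact if_pos (by simpa using hgt)
    · rw [List.foldl_append]
      simp only [List.foldl_cons, List.foldl_nil]
      exact if_neg (by simpa using hgt)
    · rfl

theorem upd_eq (a L : Int) (F F' : Bool) (st : Int × Int) (h2 : 0 ≤ st.2) (hF : F = F') :
    (if L > st.2 then (if F then (a, L) else st) else st)
      = (if decide (L > 0) && F' then (if L > st.2 then (a, L) else st) else st) := by
  subst hF
  by_cases hL : L > st.2
  · have : L > 0 := by omega
    cases F <;> simp [hL, this]
  · cases F <;> simp [hL]

theorem pair_step (s : List Int) (i : Int) (h0 : 0 ≤ i) (hn : i < (s.length : Int))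
    (st : Int × Int) (h2 : 0 ≤ st.2) :
    fusedStep s (prefSums (badList s)) (fusedStep s (prefSums (badList s)) st (2 * i)) (2 * i + 1)
      = fibStep s st i := by
  have hc : (2 * i + 1 + 1 : Int) = 2 * (i + 1) := by ring
  simp only [fibStep, fusedStep, fd2 i, fd2' i, hc, fd2 (i + 1), centerExpand_eq]
  set ab1 := expandBounds s i i with hab1
  set ab2 := expandBounds s i (i + 1) with hab2
  have hsum1 : ab1.1 + ab1.2 = 2 * i + 1 := by
    have := eb_sum s i i; rw [← hab1] at this; omega
  have hsum2 : ab2.1 + ab2.2 = 2 * i + 2 := by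
    have := eb_sum s i (i + 1); rw [← hab2] at this; omega
  have ha1 : 0 ≤ ab1.1 := eb_fst s i i (by omega)
  have ha2 : 0 ≤ ab2.1 := eb_fst s i (i + 1) (by omega)
  have hb1 : ab1.2 ≤ (s.length : Int) := eb_snd_le s i i (by omega)
  have hb2 : ab2.2 ≤ (s.length : Int) := eb_snd_le s i (i + 1) (by omega)
  have hb1' : 0 ≤ ab1.2 := by
    have := eb_snd_ge s i i; rw [← hab1] at this; omega
  have hb2' : 0 ≤ ab2.2 := by
    have := eb_snd_ge s i (i + 1); rw [← hab2] at this; omega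
  have e1 : ab1.2 - ab1.1 - 1 = 2 * (i - ab1.1) := by omega
  have e2 : i - (i - ab1.1) = ab1.1 := by omega
  have e3 : i + (i - ab1.1) + 1 = ab1.2 := by omega
  have f1 : ab2.2 - ab2.1 = 2 * (i + 1 - ab2.1) := by omega
  have f2 : i - (i + 1 - ab2.1) + 1 = ab2.1 := by omega
  have f3 : i + (i + 1 - ab2.1) + 1 = ab2.2 := by omega
  have g1 : PySem.Int.floordiv (ab1.2 - ab1.1 - 1) 2 = i - ab1.1 := by rw [e1]; exact fd2 _
  have g2 : PySem.Int.floordiv (ab2.2 - ab2.1) 2 = i + 1 - ab2.1 := by rw [f1]; exact fd2 _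
  simp only [g1, e2, e3, g2, f2, f3]
  rw [← upd_eq ab1.1 (ab1.2 - ab1.1) (isFibonacci (PySem.List.slice s (some ab1.1) (some ab1.2)))
        (fibOk (prefSums (badList s)) ab1.1 ab1.2) st h2
        (fib_eq_fibOk s ab1.1 ab1.2 ha1 hb1' hb1)]
  set st1 := (if ab1.2 - ab1.1 > st.2 then
      (if isFibonacci (PySem.List.slice s (some ab1.1) (some ab1.2)) = true
        then (ab1.1, ab1.2 - ab1.1) else st) else st) with hst1
  have h21 : 0 ≤ st1.2 := by
    rw [hst1]
    split_ifs with hx hy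
    · simp; omega
    · exact h2
    · exact h2
  rw [← upd_eq ab2.1 (ab2.2 - ab2.1) (isFibonacci (PySem.List.slice s (some ab2.1) (some ab2.2)))
        (fibOk (prefSums (badList s)) ab2.1 ab2.2) st1 h21
        (fib_eq_fibOk s ab2.1 ab2.2 ha2 hb2' hb2)]

theorem fibStep_snd (s : List Int) (st : Int × Int) (i : Int) : st.2 ≤ (fibStep s st i).2 := by
  simp only [fibStep]
  split_ifs with h1 h2 h3 h4 <;> simp_all <;> omega

theorem fold_snd (s : List Int) (l : List Int) (st : Int × Int) (h : 0 ≤ st.2) :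
    0 ≤ (l.foldl (fibStep s) st).2 := by
  induction l generalizing st with
  | nil => simpa using h
  | cons x t ih =>
    simp only [List.foldl_cons]
    exact ih _ (le_trans h (fibStep_snd s st x))

theorem fold_eq (s : List Int) : ∀ (m : Nat), m ≤ s.length → ∀ (st : Int × Int), 0 ≤ st.2 →
    (PySem.List.pyRange 0 (m : Int) 1).foldl (fibStep s) st
      = (PySem.List.pyRange 0 (2 * (m : Int)) 1).foldl (fusedStep s (prefSums (badList s))) st := by
  intro m
  induction m with
  | zero =>
    intro _ st _
    norm_num [PySem.List.pyRange_one_eq_nil]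
  | succ m ih =>
    intro hm st hst
    have hcast : ((m + 1 : Nat) : Int) = (m : Int) + 1 := by push_cast; ring
    rw [hcast, PySem.List.pyRange_one_succ_right (by positivity : (0:Int) ≤ (m : Int))]
    have hsplit2 : (2 : Int) * ((m : Int) + 1) = 2 * (m : Int) + 2 := by ring
    rw [hsplit2, PySem.List.pyRange_one_append 0 (2 * (m : Int)) (2 * (m : Int) + 2)
      (by positivity) (by omega)]
    have hsing : PySem.List.pyRange (2 * (m : Int) + 1) (2 * (m : Int) + 2) 1
        = [2 * (m : Int) + 1] := by
      have h21 : (2 * (m : Int) + 2) = (2 * (m : Int) + 1) + 1 := by ring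
      rw [h21, PySem.List.pyRange_one_singleton]
    have hpair : PySem.List.pyRange (2 * (m : Int)) (2 * (m : Int) + 2) 1
        = [2 * (m : Int), 2 * (m : Int) + 1] := by
      rw [PySem.List.pyRange_one_cons (by omega : (2 * (m : Int)) < 2 * (m : Int) + 2), hsing]
    rw [hpair]
    rw [List.foldl_append, List.foldl_append]
    rw [ih (by omega) st hst]
    simp only [List.foldl_cons, List.foldl_nil]
    rw [pair_step s (m : Int) (by positivity) (by exact_mod_cast Nat.cast_lt.mpr (by omega))]
    have h2' : 0 ≤ ((PySem.List.pyRange 0 (2 * (m : Int)) 1).foldl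
        (fusedStep s (prefSums (badList s))) st).2 := by
      rw [← ih (by omega) st hst]
      exact fold_snd s _ st hst
    exact h2'

-- ===== VERDICT (by name: the statement is the Claim_ definition above) =====
theorem FindFibonacciPalindrome_spec : Claim_equal_FindFibonacciPalindrome := by
  intro seq _
  show FindFibonacciPalindrome seq = FindFibonacciPalindrome_alt seq
  unfold FindFibonacciPalindrome FindFibonacciPalindrome_alt
  by_cases h : seq.length < 1
  · simp [h]
  · simp only [if_neg h]
    rw [sel_gen seq (prefSums (badList seq)) _ [] (0, 0)]
    simp only [List.foldl_nil]
    rw [← fold_eq seq seq.length le_rfl (0, 0) (by simp)]
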